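-- pv_equiv track=rewrite | github.com/siddhantkhandelwal/competitiveprog-submissions | foobar/queue-to-do.py | solution
-- ===== SOURCE A (Python) =====
-- def solution(start, length):
--     # Your code here
--     from operator import xor
--
--     def findXOR(n):
--         mod = n % 4
--
--         # If n is a multiple of 4
--         if (mod == 0):
--             return n
--
--         # If n % 4 gives remainder 1
--         elif (mod == 1):
--             return 1
--
--         # If n % 4 gives remainder 2
--         elif (mod == 2):
--             return n + 1
--
--         # If n % 4 gives remainder 3
--         elif (mod == 3):
--             return 0
--
--     def findXORFun(l, r):
--         return (xor(findXOR(l - 1), findXOR(r)))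
--
--     resultxor = 0
--     initial = start
--     for i in range(length):
--         end = initial + length - 1 - i
--         Xor = findXORFun(initial, end)
--         resultxor = xor(resultxor, Xor)
--         initial = initial + length
--     return resultxor
-- ===== SOURCE B (Python) =====
-- def solution(start, length):
--     def rangexor(l, r):
--         # XOR of all integers in [l, r]: peel an odd l / even r end, then every
--         # remaining (even, odd) pair XORs to 1, so only the pair-count parity matters.
--         res = 0
--         if l % 2 == 1:
--             res ^= l
--             l += 1
--         if r % 2 == 0:
--             res ^= r
--             r -= 1
--         if l <= r and ((r - l + 1) // 2) % 2 == 1: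
--             res ^= 1
--         return res
--
--     def rec(lo, hi):
--         # XOR of rows lo..hi-1, by recursive halving of the row range
--         if hi <= lo:
--             return 0
--         if hi - lo == 1:
--             initial = start + lo * length
--             return rangexor(initial, initial + length - 1 - lo)
--         mid = (lo + hi) // 2
--         return rec(lo, mid) ^ rec(mid, hi)
--
--     return rec(0, length)
-- ===== Notes on version B (the rewrite author's own statement) =====
-- stated objective: alternative
-- what changed: B replaces A's linear left-fold with a carried row accumulator and its mod-4 prefix-XOR table (XOR[l,r] = f(l-1)^f(r)) by a divide-and-conquer recursion that halves the row-index range and combines the halves with XOR, each leaf computing its row start directly as start + lo*length and the row XOR by interval pairing (peel an odd left / even right endpoint; every remaining (even,odd) pair XORs to 1, so only the pair-count parity matters).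
import Mathlib
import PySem

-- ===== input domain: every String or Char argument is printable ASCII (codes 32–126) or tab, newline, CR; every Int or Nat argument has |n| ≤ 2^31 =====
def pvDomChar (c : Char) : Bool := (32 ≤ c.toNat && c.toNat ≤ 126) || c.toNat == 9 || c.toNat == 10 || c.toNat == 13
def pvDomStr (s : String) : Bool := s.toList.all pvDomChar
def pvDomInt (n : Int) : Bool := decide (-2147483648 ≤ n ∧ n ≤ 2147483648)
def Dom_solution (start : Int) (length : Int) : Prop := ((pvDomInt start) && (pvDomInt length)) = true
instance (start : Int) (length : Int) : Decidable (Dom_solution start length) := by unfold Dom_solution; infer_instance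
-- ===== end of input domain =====

-- B replaces A's linear fold with a carried accumulator and mod-4 prefix-XOR
-- table by a divide-and-conquer recursion over the row range with an
-- interval-pairing row XOR; the two agree on every input.

-- ===== PORT A =====
-- helper findXOR: prefix-XOR closed form keyed on n % 4 (Python floor mod);
-- the Python if/elif chain is exhaustive for divisor 4, the final branch is mod == 3
def pvFindXOR (n : Int) : Int :=
  let m := PySem.Int.mod n 4
  if m = 0 then n
  else if m = 1 then 1
  else if m = 2 then n + 1
  else 0

def pvFindXORFun (l : Int) (r : Int) : Int :=
  PySem.Int.bxor (pvFindXOR (l - 1)) (pvFindXOR r)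

def solution (start : Int) (length : Int) : Int :=
  ((PySem.List.pyRange 0 length 1).foldl
    (fun (s : Int × Int) i =>
      let e := s.2 + length - 1 - i
      (PySem.Int.bxor s.1 (pvFindXORFun s.2 e), s.2 + length))
    (0, start)).1

-- ===== PORT B =====
-- rangexor: XOR of [l, r] by peeling an odd l / even r end; each remaining
-- (even, odd) pair XORs to 1, so only the pair-count parity contributes
def pvRangeXor (l : Int) (r : Int) : Int :=
  let res : Int := 0
  let p1 : Int × Int := if PySem.Int.mod l 2 = 1 then (PySem.Int.bxor res l, l + 1) else (res, l)
  let p2 : Int × Int := if PySem.Int.mod r 2 = 0 then (PySem.Int.bxor p1.1 r, r - 1) else (p1.1, r)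
  if p1.2 ≤ p2.2 ∧ PySem.Int.mod (PySem.Int.floordiv (p2.2 - p1.2 + 1) 2) 2 = 1 then
    PySem.Int.bxor p2.1 1
  else p2.1

-- rec: XOR of rows lo..hi-1, by recursive halving of the row range
def pvRec (start : Int) (length : Int) (lo : Int) (hi : Int) : Int :=
  if _h0 : hi ≤ lo then 0
  else if _h1 : hi - lo = 1 then
    let initial := start + lo * length
    pvRangeXor initial (initial + length - 1 - lo)
  else
    let mid := PySem.Int.floordiv (lo + hi) 2
    PySem.Int.bxor (pvRec start length lo mid) (pvRec start length mid hi)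
termination_by (hi - lo).toNat
decreasing_by
  · have := PySem.Int.floordiv_eq_ediv_of_pos (a := lo + hi) (b := 2) (by norm_num)
    omega
  · have := PySem.Int.floordiv_eq_ediv_of_pos (a := lo + hi) (b := 2) (by norm_num)
    omega

def solution_alt (start : Int) (length : Int) : Int :=
  pvRec start length 0 length

-- ===== PRECONDITION & SPEC =====
def Spec_solution (start : Int) (length : Int) (out : Int) : Prop := out = solution_alt start length
instance (start : Int) (length : Int) (out : Int) : Decidable (Spec_solution start length out) := by unfold Spec_solution; infer_instance

-- ===== CLAIM (what is proved, stated in full; the proofs are below) =====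
def Claim_equal_solution : Prop := ∀ (start : Int) (length : Int), Dom_solution start length → Spec_solution start length (solution start length)

-- ===== LEMMAS AND PROOFS =====

-- sign/magnitude encoding of Int used to prove associativity of Python xor
def pvDec (p : Bool × Nat) : Int := if p.1 then -(p.2 : Int) - 1 else (p.2 : Int)
def pvEnc (a : Int) : Bool × Nat := if 0 ≤ a then (false, a.toNat) else (true, (-a - 1).toNat)
def pvOp (p q : Bool × Nat) : Bool × Nat := (xor p.1 q.1, p.2 ^^^ q.2)

theorem pvDec_enc (a : Int) : pvDec (pvEnc a) = a := by
  by_cases h : 0 ≤ a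
  · simp [pvEnc, pvDec, h]
  · simp [pvEnc, pvDec, h]
    omega

theorem pvBxor_dec (p q : Bool × Nat) :
    PySem.Int.bxor (pvDec p) (pvDec q) = pvDec (pvOp p q) := by
  obtain ⟨s1, m1⟩ := p
  obtain ⟨s2, m2⟩ := q
  cases s1 <;> cases s2
  · simp [pvDec, pvOp]
  · simp only [pvDec, pvOp, Bool.xor_true, if_true, if_false, Bool.false_eq_true,
      PySem.Int.bxor]
    rw [if_pos (Int.natCast_nonneg m1), if_neg (by omega)]
    have e : -(-((m2 : Nat) : Int) - 1) - 1 = ((m2 : Nat) : Int) := by ring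
    rw [e]
    simp
  · simp only [pvDec, pvOp, Bool.true_xor, if_true, if_false, Bool.false_eq_true,
      PySem.Int.bxor]
    rw [if_neg (by omega), if_pos (Int.natCast_nonneg m2)]
    have e : -(-((m1 : Nat) : Int) - 1) - 1 = ((m1 : Nat) : Int) := by ring
    rw [e]
    simp
  · simp only [pvDec, pvOp, Bool.true_xor, Bool.not_true, if_true,
      PySem.Int.bxor]
    rw [if_neg (by omega), if_neg (by omega)]
    have e1 : -(-((m1 : Nat) : Int) - 1) - 1 = ((m1 : Nat) : Int) := by ring
    have e2 : -(-((m2 : Nat) : Int) - 1) - 1 = ((m2 : Nat) : Int) := by ring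
    rw [e1, e2]
    simp

theorem pvBxor_assoc (a b c : Int) :
    PySem.Int.bxor (PySem.Int.bxor a b) c = PySem.Int.bxor a (PySem.Int.bxor b c) := by
  rw [← pvDec_enc a, ← pvDec_enc b, ← pvDec_enc c, pvBxor_dec, pvBxor_dec,
    pvBxor_dec, pvBxor_dec]
  simp [pvOp, Nat.xor_assoc]

theorem pvBxor_zero_left (a : Int) : PySem.Int.bxor 0 a = a := by
  rw [PySem.Int.bxor_comm, PySem.Int.bxor_zero]

theorem pvBxor_cancel (a b : Int) : PySem.Int.bxor a (PySem.Int.bxor a b) = b := by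
  rw [← pvBxor_assoc, PySem.Int.bxor_self, pvBxor_zero_left]

theorem pvNat_even_xor_one (k : Nat) : (2 * k) ^^^ 1 = 2 * k + 1 := by
  apply Nat.eq_of_testBit_eq
  intro i
  cases i with
  | zero => simp
  | succ j => simp [Nat.testBit_succ]

theorem pvNat_odd_xor_one (k : Nat) : (2 * k + 1) ^^^ 1 = 2 * k := by
  rw [← pvNat_even_xor_one, Nat.xor_assoc]
  simp

theorem pvBxor_one_of_even (n : Int) (h : n % 2 = 0) :
    PySem.Int.bxor n 1 = n + 1 := by
  by_cases hn : 0 ≤ n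
  · obtain ⟨k, hk⟩ : ∃ k : Nat, n = 2 * (k : Int) := ⟨(n / 2).toNat, by omega⟩
    subst hk
    have : (2 * (k : Int)) = ((2 * k : Nat) : Int) := by push_cast; ring
    rw [this]
    have h1 : (1 : Int) = ((1 : Nat) : Int) := rfl
    rw [h1, PySem.Int.bxor_natCast, pvNat_even_xor_one]
    push_cast; ring
  · obtain ⟨k, hk⟩ : ∃ k : Nat, (-n - 1).toNat = 2 * k + 1 := ⟨((-n - 2) / 2).toNat, by omega⟩
    simp only [PySem.Int.bxor, if_neg hn, if_pos (by norm_num : (0:Int) ≤ 1)]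
    rw [hk]
    have : (1 : Int).toNat = 1 := rfl
    rw [this, pvNat_odd_xor_one]
    omega

theorem pvStep (n : Int) :
    pvFindXOR (n + 1) = PySem.Int.bxor (pvFindXOR n) (n + 1) := by
  have e0 : PySem.Int.mod n 4 = n % 4 := PySem.Int.mod_eq_emod_of_pos (by norm_num)
  have e1 : PySem.Int.mod (n + 1) 4 = (n + 1) % 4 := PySem.Int.mod_eq_emod_of_pos (by norm_num)
  have h : n % 4 = 0 ∨ n % 4 = 1 ∨ n % 4 = 2 ∨ n % 4 = 3 := by omega
  rcases h with h | h | h | h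
  · have h1 : (n + 1) % 4 = 1 := by omega
    simp only [pvFindXOR, e0, e1, h, h1]
    norm_num
    have hev : PySem.Int.bxor n 1 = n + 1 := pvBxor_one_of_even n (by omega)
    rw [← hev, ← pvBxor_assoc, PySem.Int.bxor_self]
    decide
  · have h1 : (n + 1) % 4 = 2 := by omega
    simp only [pvFindXOR, e0, e1, h, h1]
    norm_num
    rw [PySem.Int.bxor_comm, pvBxor_one_of_even (n + 1) (by omega)]
  · have h1 : (n + 1) % 4 = 3 := by omega
    simp only [pvFindXOR, e0, e1, h, h1]
    norm_num [PySem.Int.bxor_self]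
  · have h1 : (n + 1) % 4 = 0 := by omega
    simp only [pvFindXOR, e0, e1, h, h1]
    norm_num
    rw [PySem.Int.bxor_comm, PySem.Int.bxor_zero]

theorem pvF_step (l r : Int) :
    pvFindXORFun l (r + 1) = PySem.Int.bxor (pvFindXORFun l r) (r + 1) := by
  unfold pvFindXORFun
  rw [pvStep r, ← pvBxor_assoc]

theorem pvF_nil (l : Int) : pvFindXORFun l (l - 1) = 0 := by
  unfold pvFindXORFun
  exact PySem.Int.bxor_self _

theorem pvF_single (l : Int) : pvFindXORFun l l = l := by
  have h := pvF_step l (l - 1)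
  rw [show l - 1 + 1 = l from by ring, pvF_nil, pvBxor_zero_left] at h
  exact h

theorem pvF_peel (l r : Int) :
    pvFindXORFun l r = PySem.Int.bxor l (pvFindXORFun (l + 1) r) := by
  have hG : pvFindXOR l = PySem.Int.bxor (pvFindXOR (l - 1)) l := by
    have h := pvStep (l - 1)
    rw [show l - 1 + 1 = l from by ring] at h
    exact h
  unfold pvFindXORFun
  rw [show l + 1 - 1 = l from by ring, hG, ← pvBxor_assoc,
    PySem.Int.bxor_comm (pvFindXOR (l - 1)) l, pvBxor_cancel]

theorem pvPair (e : Int) (he : e % 2 = 0) : PySem.Int.bxor e (e + 1) = 1 := by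
  rw [← pvBxor_one_of_even e he, pvBxor_cancel]

-- XOR of j full (even, odd) pairs starting at an even e is the pair-count parity
theorem pvFull (j : Nat) : ∀ (e : Int), e % 2 = 0 →
    pvFindXORFun e (e + 2 * (j : Int) - 1) = if j % 2 = 1 then 1 else 0 := by
  induction j with
  | zero =>
    intro e _
    simp only [Nat.cast_zero, mul_zero, add_zero]
    rw [pvF_nil]
    simp
  | succ j ih =>
    intro e he
    have hx : e + 2 * ((j : Int) + 1) - 1 = ((e + 2 * (j : Int) - 1) + 1) + 1 := by ring
    push_cast
    rw [hx, pvF_step, pvF_step, pvBxor_assoc, ih e he,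
      show e + 2 * (j : Int) - 1 + 1 = e + 2 * (j : Int) from by ring,
      show e + 2 * (j : Int) + 1 = (e + 2 * (j : Int)) + 1 from by ring,
      pvPair (e + 2 * (j : Int)) (by omega)]
    by_cases hp : j % 2 = 1
    · rw [if_pos hp, if_neg (by omega)]
      decide
    · rw [if_neg hp, if_pos (by omega)]
      decide

-- B's pairing row XOR equals A's prefix-XOR closed form on every interval [l, r]
theorem pvRangeXor_eq (l r : Int) (h : l ≤ r) : pvRangeXor l r = pvFindXORFun l r := by
  have m2l : PySem.Int.mod l 2 = l % 2 := PySem.Int.mod_eq_emod_of_pos (by norm_num)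
  have m2r : PySem.Int.mod r 2 = r % 2 := PySem.Int.mod_eq_emod_of_pos (by norm_num)
  by_cases hl : l % 2 = 1 <;> by_cases hr : r % 2 = 0 <;>
    simp only [pvRangeXor, m2l, m2r, hl, hr] <;> simp only [pysem] <;> norm_num
  · -- l odd, r even (so l < r)
    by_cases hc : l + 1 < r
    · obtain ⟨j, hj⟩ : ∃ j : Nat, 2 * (j : Int) = r - l - 1 := ⟨((r - l - 1) / 2).toNat, by omega⟩
      have hcond : (r - 1 - (l + 1) + 1) / 2 % 2 = (j : Int) % 2 := by omega
      have hfull := pvFull j (l + 1) (by omega)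
      rw [show l + 1 + 2 * (j : Int) - 1 = r - 1 from by omega] at hfull
      have hstep := pvF_step (l + 1) (r - 1)
      rw [show r - 1 + 1 = r from by ring] at hstep
      rw [pvF_peel, hstep, hfull, hcond]
      by_cases hp : (j : Int) % 2 = 1
      · rw [if_pos ⟨hc, hp⟩, if_pos (by omega : j % 2 = 1),
          PySem.Int.bxor_comm r l, ← pvBxor_assoc, PySem.Int.bxor_comm 1 l, pvBxor_assoc]
      · rw [if_neg (by rintro ⟨-, hx⟩; exact hp hx), if_neg (by omega : ¬ j % 2 = 1),
          pvBxor_zero_left, PySem.Int.bxor_comm r l]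
    · have hr1 : r = l + 1 := by omega
      subst hr1
      rw [if_neg (by rintro ⟨hx, -⟩; omega), pvF_peel, pvF_single, PySem.Int.bxor_comm]
  · -- l odd, r odd
    by_cases hc : l < r
    · obtain ⟨j, hj⟩ : ∃ j : Nat, 2 * (j : Int) = r - l := ⟨((r - l) / 2).toNat, by omega⟩
      have hcond : (r - (l + 1) + 1) / 2 % 2 = (j : Int) % 2 := by omega
      have hfull := pvFull j (l + 1) (by omega)
      rw [show l + 1 + 2 * (j : Int) - 1 = r from by omega] at hfull
      rw [pvF_peel, hfull, hcond]
      by_cases hp : (j : Int) % 2 = 1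
      · rw [if_pos ⟨hc, hp⟩, if_pos (by omega : j % 2 = 1), PySem.Int.bxor_comm]
      · rw [if_neg (by rintro ⟨-, hx⟩; exact hp hx), if_neg (by omega : ¬ j % 2 = 1),
          PySem.Int.bxor_zero]
    · have hr1 : r = l := by omega
      subst hr1
      rw [if_neg (by rintro ⟨hx, -⟩; omega), pvF_single]
  · -- l even, r even
    by_cases hc : l < r
    · obtain ⟨j, hj⟩ : ∃ j : Nat, 2 * (j : Int) = r - l := ⟨((r - l) / 2).toNat, by omega⟩
      have hcond : (r - 1 - l + 1) / 2 % 2 = (j : Int) % 2 := by omega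
      have hfull := pvFull j l (by omega)
      rw [show l + 2 * (j : Int) - 1 = r - 1 from by omega] at hfull
      have hstep := pvF_step l (r - 1)
      rw [show r - 1 + 1 = r from by ring] at hstep
      rw [hstep, hfull, hcond]
      by_cases hp : (j : Int) % 2 = 1
      · rw [if_pos ⟨hc, hp⟩, if_pos (by omega : j % 2 = 1)]
      · rw [if_neg (by rintro ⟨-, hx⟩; exact hp hx), if_neg (by omega : ¬ j % 2 = 1),
          pvBxor_zero_left]
    · have hr1 : r = l := by omega
      subst hr1
      rw [if_neg (by rintro ⟨hx, -⟩; omega), pvF_single]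
  · -- l even, r odd (so l < r)
    obtain ⟨j, hj⟩ : ∃ j : Nat, 2 * (j : Int) = r - l + 1 := ⟨((r - l + 1) / 2).toNat, by omega⟩
    have hcond : (r - l + 1) / 2 % 2 = (j : Int) % 2 := by omega
    have hfull := pvFull j l (by omega)
    rw [show l + 2 * (j : Int) - 1 = r from by omega] at hfull
    rw [hfull, hcond]
    by_cases hp : (j : Int) % 2 = 1
    · rw [if_pos ⟨h, hp⟩, if_pos (by omega : j % 2 = 1)]
    · rw [if_neg (by rintro ⟨-, hx⟩; exact hp hx), if_neg (by omega : ¬ j % 2 = 1)]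

-- row i's XOR, the leaf value of B's recursion
def pvRow (start : Int) (length : Int) (i : Int) : Int :=
  pvRangeXor (start + i * length) (start + i * length + length - 1 - i)

-- a XOR fold from acc equals acc XOR the fold from 0
theorem pvFold_shift (g : Int → Int) (xs : List Int) : ∀ (acc : Int),
    xs.foldl (fun a i => PySem.Int.bxor a (g i)) acc
    = PySem.Int.bxor acc (xs.foldl (fun a i => PySem.Int.bxor a (g i)) 0) := by
  induction xs with
  | nil => intro acc; simp [PySem.Int.bxor_zero]
  | cons x xs ih =>
    intro acc
    simp only [List.foldl_cons]
    rw [ih (PySem.Int.bxor acc (g x)), ih (PySem.Int.bxor 0 (g x)),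
      pvBxor_zero_left, pvBxor_assoc]

-- B's divide-and-conquer over the rows equals the linear XOR fold over the rows
theorem pvRec_eq (start length : Int) (n : Nat) : ∀ (lo hi : Int), (hi - lo).toNat = n →
    pvRec start length lo hi
    = (PySem.List.pyRange lo hi 1).foldl
        (fun a i => PySem.Int.bxor a (pvRow start length i)) 0 := by
  induction n using Nat.strong_induction_on with
  | _ n ih =>
    intro lo hi hn
    rw [pvRec]
    by_cases h0 : hi ≤ lo
    · rw [dif_pos h0, PySem.List.pyRange_one_eq_nil h0]
      simp
    · rw [dif_neg h0]
      by_cases h1 : hi - lo = 1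
      · rw [dif_pos h1, show hi = lo + 1 from by omega, PySem.List.pyRange_one_singleton]
        simp only [List.foldl_cons, List.foldl_nil]
        rw [pvBxor_zero_left]
        rfl
      · rw [dif_neg h1]
        have hmid : PySem.Int.floordiv (lo + hi) 2 = (lo + hi) / 2 :=
          PySem.Int.floordiv_eq_ediv_of_pos (by norm_num)
        have hb : lo < PySem.Int.floordiv (lo + hi) 2 ∧ PySem.Int.floordiv (lo + hi) 2 < hi := by
          rw [hmid]; omega
        show PySem.Int.bxor (pvRec start length lo (PySem.Int.floordiv (lo + hi) 2))
            (pvRec start length (PySem.Int.floordiv (lo + hi) 2) hi) = _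
        rw [ih (PySem.Int.floordiv (lo + hi) 2 - lo).toNat (by omega) lo _ rfl,
          ih (hi - PySem.Int.floordiv (lo + hi) 2).toNat (by omega) _ hi rfl,
          PySem.List.pyRange_one_append lo (PySem.Int.floordiv (lo + hi) 2) hi (by omega) (by omega),
          List.foldl_append, pvFold_shift]
        conv_rhs => rw [pvFold_shift]

-- A's fold with carried (res, initial) equals the XOR fold over the rows,
-- with A's carried `initial` equal to start + a*length
theorem pvOuter (start length : Int) (k : Nat) : ∀ (a res : Int),
    a + (k : Int) = length →
    ((PySem.List.pyRange a (a + (k : Int)) 1).foldl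
      (fun (s : Int × Int) i =>
        let e := s.2 + length - 1 - i
        (PySem.Int.bxor s.1 (pvFindXORFun s.2 e), s.2 + length))
      (res, start + a * length)).1
    = (PySem.List.pyRange a (a + (k : Int)) 1).foldl
        (fun r i => PySem.Int.bxor r (pvRow start length i)) res := by
  induction k with
  | zero =>
    intro a res _
    simp only [Nat.cast_zero, add_zero]
    rw [PySem.List.pyRange_one_eq_nil le_rfl]
    simp
  | succ k ih =>
    intro a res hlen
    push_cast
    push_cast at hlen
    rw [PySem.List.pyRange_one_cons (by omega)]
    simp only [List.foldl_cons]
    have hrange : a + ((k : Int) + 1) = (a + 1) + (k : Int) := by ring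
    rw [hrange]
    have hrow : pvRow start length a
        = pvFindXORFun (start + a * length) (start + a * length + length - 1 - a) := by
      unfold pvRow
      exact pvRangeXor_eq _ _ (by omega)
    have h := ih (a + 1) (PySem.Int.bxor res (pvFindXORFun (start + a * length) (start + a * length + length - 1 - a))) (by omega)
    rw [show start + (a + 1) * length = start + a * length + length from by ring] at h
    simp only at h ⊢
    rw [hrow]
    exact h

-- ===== VERDICT (by name: the statement is the Claim_ definition above) =====
theorem solution_spec : Claim_equal_solution := by
  intro start length _
  unfold Spec_solution solution solution_alt
  rw [pvRec_eq start length (length - 0).toNat 0 length rfl]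
  by_cases hl : length ≤ 0
  · rw [PySem.List.pyRange_one_eq_nil hl]
    simp
  · have h := pvOuter start length length.toNat 0 0 (by omega)
    rw [show (0 : Int) + (length.toNat : Int) = length from by omega] at h
    simpa using h
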